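-- pv_equiv track=rewrite | github.com/explosion/spaCy | spacy/lang/ru/lemmatizer.py | oc2ud
-- ===== SOURCE A (Python) =====
-- from typing import Optional, List, Dict, Tuple, Callable
--
-- def oc2ud(oc_tag: str) -> Tuple[str, Dict[str, str]]:
--     gram_map = {
--         "_POS": {
--             "ADJF": "ADJ",
--             "ADJS": "ADJ",
--             "ADVB": "ADV",
--             "Apro": "DET",
--             "COMP": "ADJ",  # Can also be an ADV - unchangeable
--             "CONJ": "CCONJ",  # Can also be a SCONJ - both unchangeable ones
--             "GRND": "VERB",
--             "INFN": "VERB",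
--             "INTJ": "INTJ",
--             "NOUN": "NOUN",
--             "NPRO": "PRON",
--             "NUMR": "NUM",
--             "NUMB": "NUM",
--             "PNCT": "PUNCT",
--             "PRCL": "PART",
--             "PREP": "ADP",
--             "PRTF": "VERB",
--             "PRTS": "VERB",
--             "VERB": "VERB",
--         },
--         "Animacy": {"anim": "Anim", "inan": "Inan"},
--         "Aspect": {"impf": "Imp", "perf": "Perf"},
--         "Case": {
--             "ablt": "Ins",
--             "accs": "Acc",
--             "datv": "Dat",
--             "gen1": "Gen",
--             "gen2": "Gen",
--             "gent": "Gen",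
--             "loc2": "Loc",
--             "loct": "Loc",
--             "nomn": "Nom",
--             "voct": "Voc",
--         },
--         "Degree": {"COMP": "Cmp", "Supr": "Sup"},
--         "Gender": {"femn": "Fem", "masc": "Masc", "neut": "Neut"},
--         "Mood": {"impr": "Imp", "indc": "Ind"},
--         "Number": {"plur": "Plur", "sing": "Sing"},
--         "NumForm": {"NUMB": "Digit"},
--         "Person": {"1per": "1", "2per": "2", "3per": "3", "excl": "2", "incl": "1"},
--         "Tense": {"futr": "Fut", "past": "Past", "pres": "Pres"},
--         "Variant": {"ADJS": "Brev", "PRTS": "Brev"},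
--         "VerbForm": {
--             "GRND": "Conv",
--             "INFN": "Inf",
--             "PRTF": "Part",
--             "PRTS": "Part",
--             "VERB": "Fin",
--         },
--         "Voice": {"actv": "Act", "pssv": "Pass"},
--         "Abbr": {"Abbr": "Yes"},
--     }
--     pos = "X"
--     morphology = dict()
--     unmatched = set()
--     grams = oc_tag.replace(" ", ",").split(",")
--     for gram in grams:
--         match = False
--         for categ, gmap in sorted(gram_map.items()):
--             if gram in gmap:
--                 match = True
--                 if categ == "_POS":
--                     pos = gmap[gram]
--                 else:
--                     morphology[categ] = gmap[gram]
--         if not match: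
--             unmatched.add(gram)
--     while len(unmatched) > 0:
--         gram = unmatched.pop()
--         if gram in ("Name", "Patr", "Surn", "Geox", "Orgn"):
--             pos = "PROPN"
--         elif gram == "Auxt":
--             pos = "AUX"
--         elif gram == "Pltm":
--             morphology["Number"] = "Ptan"
--     return pos, morphology
-- ===== SOURCE B (Python) =====
-- # one spec entry per OpenCorpora gram: "<gram> <UD POS or -> [<Category>=<Value> ...]"
-- # (morphology pairs listed in sorted-category order)
-- _SPEC = [
--     "Abbr - Abbr=Yes",
--     "anim - Animacy=Anim",
--     "inan - Animacy=Inan",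
--     "impf - Aspect=Imp",
--     "perf - Aspect=Perf",
--     "ablt - Case=Ins",
--     "accs - Case=Acc",
--     "datv - Case=Dat",
--     "gen1 - Case=Gen",
--     "gen2 - Case=Gen",
--     "gent - Case=Gen",
--     "loc2 - Case=Loc",
--     "loct - Case=Loc",
--     "nomn - Case=Nom",
--     "voct - Case=Voc",
--     "COMP ADJ Degree=Cmp",
--     "Supr - Degree=Sup",
--     "femn - Gender=Fem",
--     "masc - Gender=Masc",
--     "neut - Gender=Neut",
--     "impr - Mood=Imp",
--     "indc - Mood=Ind",
--     "NUMB NUM NumForm=Digit",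
--     "plur - Number=Plur",
--     "sing - Number=Sing",
--     "1per - Person=1",
--     "2per - Person=2",
--     "3per - Person=3",
--     "excl - Person=2",
--     "incl - Person=1",
--     "futr - Tense=Fut",
--     "past - Tense=Past",
--     "pres - Tense=Pres",
--     "ADJS ADJ Variant=Brev",
--     "PRTS VERB Variant=Brev VerbForm=Part",
--     "GRND VERB VerbForm=Conv",
--     "INFN VERB VerbForm=Inf",
--     "PRTF VERB VerbForm=Part",
--     "VERB VERB VerbForm=Fin",
--     "actv - Voice=Act",
--     "pssv - Voice=Pass",
--     "ADJF ADJ",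
--     "ADVB ADV",
--     "Apro DET",
--     "CONJ CCONJ",
--     "INTJ INTJ",
--     "NOUN NOUN",
--     "NPRO PRON",
--     "NUMR NUM",
--     "PNCT PUNCT",
--     "PRCL PART",
--     "PREP ADP",
-- ]
--
-- _POS_MAP = {}
-- _MORPH_MAP = {}
-- for _line in _SPEC:
--     _f = _line.split()
--     if _f[1] != "-":
--         _POS_MAP[_f[0]] = _f[1]
--     if len(_f) > 2:
--         _MORPH_MAP[_f[0]] = [(x.split("=")[0], x.split("=")[1]) for x in _f[2:]]
--
-- def oc2ud(oc_tag):
--     pos = "X"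
--     morphology = {}
--     has_propn = has_auxt = has_pltm = False
--     for gram in oc_tag.replace(" ", ",").split(","):
--         p = _POS_MAP.get(gram)
--         if p is not None:
--             pos = p
--         pairs = _MORPH_MAP.get(gram)
--         if pairs is not None:
--             for categ, value in pairs:
--                 morphology[categ] = value
--         if p is None and pairs is None:
--             if gram in ("Name", "Patr", "Surn", "Geox", "Orgn"):
--                 has_propn = True
--             elif gram == "Auxt":
--                 has_auxt = True
--             elif gram == "Pltm":
--                 has_pltm = True
--     if has_propn:
--         pos = "PROPN"
--     elif has_auxt:
--         pos = "AUX"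
--     if has_pltm:
--         morphology["Number"] = "Ptan"
--     return pos, morphology
-- ===== Notes on version B (the rewrite author's own statement) =====
-- stated objective: simpler
-- what changed: A scans all 15 sorted gram_map categories for every gram and post-processes a hash-ordered set of unmatched grams with a pop loop; B declares the data gram-major as one compact text spec parsed once into two lookup dicts (gram->UD POS, gram->morphology pairs), does a single pass with one lookup in each per gram plus three boolean flags for the special unmatched grams, and applies the specials in closed form after the loop.
-- outside the precondition, e.g. on oc2ud('Auxt,Name,Patr,Surn,Geox,Orgn'): A returns ('PROPN', {}), B returns ('PROPN', {})
import Mathlib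
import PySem

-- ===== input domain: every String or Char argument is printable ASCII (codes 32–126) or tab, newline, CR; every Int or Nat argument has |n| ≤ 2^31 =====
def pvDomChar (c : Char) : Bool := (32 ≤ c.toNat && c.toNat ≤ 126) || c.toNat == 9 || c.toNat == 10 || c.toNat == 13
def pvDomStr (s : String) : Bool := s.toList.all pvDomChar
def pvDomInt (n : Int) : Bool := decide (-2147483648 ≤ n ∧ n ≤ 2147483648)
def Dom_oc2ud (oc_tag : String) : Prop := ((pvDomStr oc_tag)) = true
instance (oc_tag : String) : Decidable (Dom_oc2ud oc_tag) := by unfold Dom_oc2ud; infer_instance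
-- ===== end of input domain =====

-- B replaces A's per-gram scan over all 15 sorted gram_map categories and A's set-pop postprocessing by a
-- single pass over a gram-major table (one compact text spec parsed once into two lookup dicts: gram → UD POS
-- and gram → morphology pairs) with three boolean flags for the special unmatched grams, applied in closed
-- form after the loop; objective: simpler.

-- ===== PORT A =====
-- gram_map, a dict of dicts, in source (insertion) order (literal dicts as PySem.Dict.mk)
def ocGramMap : PySem.Dict String (PySem.Dict String String) := PySem.Dict.mk
  [("_POS", PySem.Dict.mk [("ADJF", "ADJ"), ("ADJS", "ADJ"), ("ADVB", "ADV"), ("Apro", "DET"), ("COMP", "ADJ"), ("CONJ", "CCONJ"), ("GRND", "VERB"), ("INFN", "VERB"), ("INTJ", "INTJ"), ("NOUN", "NOUN"), ("NPRO", "PRON"), ("NUMR", "NUM"), ("NUMB", "NUM"), ("PNCT", "PUNCT"), ("PRCL", "PART"), ("PREP", "ADP"), ("PRTF", "VERB"), ("PRTS", "VERB"), ("VERB", "VERB")]),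
   ("Animacy", PySem.Dict.mk [("anim", "Anim"), ("inan", "Inan")]),
   ("Aspect", PySem.Dict.mk [("impf", "Imp"), ("perf", "Perf")]),
   ("Case", PySem.Dict.mk [("ablt", "Ins"), ("accs", "Acc"), ("datv", "Dat"), ("gen1", "Gen"), ("gen2", "Gen"), ("gent", "Gen"), ("loc2", "Loc"), ("loct", "Loc"), ("nomn", "Nom"), ("voct", "Voc")]),
   ("Degree", PySem.Dict.mk [("COMP", "Cmp"), ("Supr", "Sup")]),
   ("Gender", PySem.Dict.mk [("femn", "Fem"), ("masc", "Masc"), ("neut", "Neut")]),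
   ("Mood", PySem.Dict.mk [("impr", "Imp"), ("indc", "Ind")]),
   ("Number", PySem.Dict.mk [("plur", "Plur"), ("sing", "Sing")]),
   ("NumForm", PySem.Dict.mk [("NUMB", "Digit")]),
   ("Person", PySem.Dict.mk [("1per", "1"), ("2per", "2"), ("3per", "3"), ("excl", "2"), ("incl", "1")]),
   ("Tense", PySem.Dict.mk [("futr", "Fut"), ("past", "Past"), ("pres", "Pres")]),
   ("Variant", PySem.Dict.mk [("ADJS", "Brev"), ("PRTS", "Brev")]),
   ("VerbForm", PySem.Dict.mk [("GRND", "Conv"), ("INFN", "Inf"), ("PRTF", "Part"), ("PRTS", "Part"), ("VERB", "Fin")]),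
   ("Voice", PySem.Dict.mk [("actv", "Act"), ("pssv", "Pass")]),
   ("Abbr", PySem.Dict.mk [("Abbr", "Yes")])]

-- the final `while len(unmatched) > 0: gram = unmatched.pop()` loop: the port pops the PySem.Set in insertion
-- order; Python pops in hash order, but under Pre_oc2ud the result is the same for every pop order.
def ocPopLoopA : PySem.Set String → String → PySem.Dict String String → String × PySem.Dict String String
  | [], pos, morphology => (pos, morphology)
  | gram :: rest, pos, morphology =>
    if gram ∈ (["Name", "Patr", "Surn", "Geox", "Orgn"] : List String) then
      ocPopLoopA rest "PROPN" morphology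
    else if gram = "Auxt" then ocPopLoopA rest "AUX" morphology
    else if gram = "Pltm" then ocPopLoopA rest pos (morphology.insert "Number" "Ptan")
    else ocPopLoopA rest pos morphology

-- loop body of `for gram in grams:` — state (pos, morphology, unmatched); the inner fold is
-- `for categ, gmap in sorted(gram_map.items()):` (keys are distinct, so Python's tuple sort is sort by key;
-- Python compares the keys as strings, and '<' on .toList is the identical code-point order).
-- `gmap[gram]` is guarded by `gram in gmap`, so getD with a dummy default is exact.
def oc2udStep (st : String × PySem.Dict String String × PySem.Set String) (gram : String) :
    String × PySem.Dict String String × PySem.Set String :=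
  let inner := (PySem.List.sorted ocGramMap.items (fun p => p.1.toList) false).foldl
    (fun acc cg =>
      if cg.2.contains gram then
        (true,
         if cg.1 = "_POS" then cg.2.getD gram "" else acc.2.1,
         if cg.1 = "_POS" then acc.2.2 else acc.2.2.insert cg.1 (cg.2.getD gram ""))
      else acc)
    (false, st.1, st.2.1)
  if inner.1 then (inner.2.1, inner.2.2, st.2.2)
  else (inner.2.1, inner.2.2, PySem.Set.add st.2.2 gram)

-- split? is none only for sep = ""; the sep here is ",", so getD [] is exact
def oc2ud (oc_tag : String) : String × (List (String × String)) :=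
  let grams := (PySem.Str.split? (PySem.Str.replace oc_tag " " ",") ",").getD []
  let st := grams.foldl oc2udStep ("X", PySem.Dict.empty, PySem.Set.empty)
  let r := ocPopLoopA st.2.2 st.1 st.2.1
  (r.1, r.2.items)

-- ===== PORT B =====
-- B's data: one spec line per OpenCorpora gram, "<gram> <UD POS or -> [<Category>=<Value> ...]"
-- (morphology pairs listed in sorted-category order), parsed once into the two lookup dicts
def ocSpec : List String :=
  ["Abbr - Abbr=Yes",
   "anim - Animacy=Anim",
   "inan - Animacy=Inan",
   "impf - Aspect=Imp",
   "perf - Aspect=Perf",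
   "ablt - Case=Ins",
   "accs - Case=Acc",
   "datv - Case=Dat",
   "gen1 - Case=Gen",
   "gen2 - Case=Gen",
   "gent - Case=Gen",
   "loc2 - Case=Loc",
   "loct - Case=Loc",
   "nomn - Case=Nom",
   "voct - Case=Voc",
   "COMP ADJ Degree=Cmp",
   "Supr - Degree=Sup",
   "femn - Gender=Fem",
   "masc - Gender=Masc",
   "neut - Gender=Neut",
   "impr - Mood=Imp",
   "indc - Mood=Ind",
   "NUMB NUM NumForm=Digit",
   "plur - Number=Plur",
   "sing - Number=Sing",
   "1per - Person=1",
   "2per - Person=2",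
   "3per - Person=3",
   "excl - Person=2",
   "incl - Person=1",
   "futr - Tense=Fut",
   "past - Tense=Past",
   "pres - Tense=Pres",
   "ADJS ADJ Variant=Brev",
   "PRTS VERB Variant=Brev VerbForm=Part",
   "GRND VERB VerbForm=Conv",
   "INFN VERB VerbForm=Inf",
   "PRTF VERB VerbForm=Part",
   "VERB VERB VerbForm=Fin",
   "actv - Voice=Act",
   "pssv - Voice=Pass",
   "ADJF ADJ",
   "ADVB ADV",
   "Apro DET",
   "CONJ CCONJ",
   "INTJ INTJ",
   "NOUN NOUN",
   "NPRO PRON",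
   "NUMR NUM",
   "PNCT PUNCT",
   "PRCL PART",
   "PREP ADP"]

def ocBuild : PySem.Dict String String × PySem.Dict String (List (String × String)) :=
  ocSpec.foldl
    (fun maps line =>
      let f := PySem.Str.split₀ line
      let pm := if f.getD 1 "" ≠ "-" then maps.1.insert (f.getD 0 "") (f.getD 1 "") else maps.1
      let mm :=
        if 2 < f.length then
          maps.2.insert (f.getD 0 "")
            ((f.drop 2).map (fun x =>
              (((PySem.Str.split? x "=").getD []).getD 0 "",
               ((PySem.Str.split? x "=").getD []).getD 1 "")))
        else maps.2
      (pm, mm))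
    (PySem.Dict.empty, PySem.Dict.empty)

-- _POS_MAP: gram → UD part of speech;  _MORPH_MAP: gram → its morphology pairs
def ocPosMap : PySem.Dict String String := ocBuild.1
def ocMorphMap : PySem.Dict String (List (String × String)) := ocBuild.2

-- loop body of B's single pass — state (pos, morphology, has_propn, has_auxt, has_pltm)
def oc2udAltStep (st : String × PySem.Dict String String × Bool × Bool × Bool) (gram : String) :
    String × PySem.Dict String String × Bool × Bool × Bool :=
  let p := ocPosMap.get? gram
  let pos := p.getD st.1
  let pairs := ocMorphMap.get? gram
  let m := (pairs.getD []).foldl (fun d cv => d.insert cv.1 cv.2) st.2.1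
  if p.isNone && pairs.isNone then
    if gram ∈ (["Name", "Patr", "Surn", "Geox", "Orgn"] : List String) then
      (pos, m, true, st.2.2.2.1, st.2.2.2.2)
    else if gram = "Auxt" then (pos, m, st.2.2.1, true, st.2.2.2.2)
    else if gram = "Pltm" then (pos, m, st.2.2.1, st.2.2.2.1, true)
    else (pos, m, st.2.2)
  else (pos, m, st.2.2)

def oc2ud_alt (oc_tag : String) : String × (List (String × String)) :=
  let st := ((PySem.Str.split? (PySem.Str.replace oc_tag " " ",") ",").getD []).foldl
    oc2udAltStep ("X", PySem.Dict.empty, false, false, false)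
  let pos := if st.2.2.1 then "PROPN" else if st.2.2.2.1 then "AUX" else st.1
  let morphology := if st.2.2.2.2 then st.2.1.insert "Number" "Ptan" else st.2.1
  (pos, morphology.items)

-- ===== PRECONDITION & SPEC =====
-- Pre_ excludes tags whose grams contain both "Auxt" and one of "Name"/"Patr"/"Surn"/"Geox"/"Orgn": there the final
-- `unmatched.pop()` loop makes pos depend on Python's unspecified set (hash) order, so A's value on such tags is
-- accidental (it varies between runs); A's port pops in insertion order, which agrees with every pop order inside Pre_.
def Pre_oc2ud (oc_tag : String) : Prop :=
  ¬ ("Auxt" ∈ (PySem.Str.split? (PySem.Str.replace oc_tag " " ",") ",").getD [] ∧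
     ∃ g ∈ (["Name", "Patr", "Surn", "Geox", "Orgn"] : List String),
       g ∈ (PySem.Str.split? (PySem.Str.replace oc_tag " " ",") ",").getD [])
instance (oc_tag : String) : Decidable (Pre_oc2ud oc_tag) := by unfold Pre_oc2ud; infer_instance

def pvWitness_oc2ud : String := "NOUN,anim masc sing nomn"

def Spec_oc2ud (oc_tag : String) (out : String × (List (String × String))) : Prop := out = oc2ud_alt oc_tag
instance (oc_tag : String) (out : String × (List (String × String))) : Decidable (Spec_oc2ud oc_tag out) := by unfold Spec_oc2ud; infer_instance

-- ===== CLAIM (what is proved, stated in full; the proofs are below) =====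
def Claim_equal_oc2ud : Prop := ∀ (oc_tag : String), Dom_oc2ud oc_tag → Pre_oc2ud oc_tag → Spec_oc2ud oc_tag (oc2ud oc_tag)

-- ===== LEMMAS AND PROOFS =====
-- the parsed tables, evaluated to literals
def ocPosLit : PySem.Dict String String := PySem.Dict.mk
  [("COMP", "ADJ"), ("NUMB", "NUM"), ("ADJS", "ADJ"), ("PRTS", "VERB"), ("GRND", "VERB"), ("INFN", "VERB"), ("PRTF", "VERB"), ("VERB", "VERB"), ("ADJF", "ADJ"), ("ADVB", "ADV"), ("Apro", "DET"), ("CONJ", "CCONJ"), ("INTJ", "INTJ"), ("NOUN", "NOUN"), ("NPRO", "PRON"), ("NUMR", "NUM"), ("PNCT", "PUNCT"), ("PRCL", "PART"), ("PREP", "ADP")]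

def ocMorphLit : PySem.Dict String (List (String × String)) := PySem.Dict.mk
  [("Abbr", [("Abbr", "Yes")]),
   ("anim", [("Animacy", "Anim")]),
   ("inan", [("Animacy", "Inan")]),
   ("impf", [("Aspect", "Imp")]),
   ("perf", [("Aspect", "Perf")]),
   ("ablt", [("Case", "Ins")]),
   ("accs", [("Case", "Acc")]),
   ("datv", [("Case", "Dat")]),
   ("gen1", [("Case", "Gen")]),
   ("gen2", [("Case", "Gen")]),
   ("gent", [("Case", "Gen")]),
   ("loc2", [("Case", "Loc")]),
   ("loct", [("Case", "Loc")]),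
   ("nomn", [("Case", "Nom")]),
   ("voct", [("Case", "Voc")]),
   ("COMP", [("Degree", "Cmp")]),
   ("Supr", [("Degree", "Sup")]),
   ("femn", [("Gender", "Fem")]),
   ("masc", [("Gender", "Masc")]),
   ("neut", [("Gender", "Neut")]),
   ("impr", [("Mood", "Imp")]),
   ("indc", [("Mood", "Ind")]),
   ("NUMB", [("NumForm", "Digit")]),
   ("plur", [("Number", "Plur")]),
   ("sing", [("Number", "Sing")]),
   ("1per", [("Person", "1")]),
   ("2per", [("Person", "2")]),
   ("3per", [("Person", "3")]),
   ("excl", [("Person", "2")]),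
   ("incl", [("Person", "1")]),
   ("futr", [("Tense", "Fut")]),
   ("past", [("Tense", "Past")]),
   ("pres", [("Tense", "Pres")]),
   ("ADJS", [("Variant", "Brev")]),
   ("PRTS", [("Variant", "Brev"), ("VerbForm", "Part")]),
   ("GRND", [("VerbForm", "Conv")]),
   ("INFN", [("VerbForm", "Inf")]),
   ("PRTF", [("VerbForm", "Part")]),
   ("VERB", [("VerbForm", "Fin")]),
   ("actv", [("Voice", "Act")]),
   ("pssv", [("Voice", "Pass")])]


set_option maxRecDepth 100000 in
set_option maxHeartbeats 4000000 in
theorem ocPos_eval : ocPosMap = ocPosLit := by decide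
set_option maxRecDepth 100000 in
set_option maxHeartbeats 4000000 in
theorem ocMorph_eval : ocMorphMap = ocMorphLit := by decide

-- sorted(gram_map.items()) evaluated to a literal (ocSorted_eval below)
def ocSortedLit : List (String × PySem.Dict String String) :=
  [("Abbr", PySem.Dict.mk [("Abbr", "Yes")]),
   ("Animacy", PySem.Dict.mk [("anim", "Anim"), ("inan", "Inan")]),
   ("Aspect", PySem.Dict.mk [("impf", "Imp"), ("perf", "Perf")]),
   ("Case", PySem.Dict.mk [("ablt", "Ins"), ("accs", "Acc"), ("datv", "Dat"), ("gen1", "Gen"), ("gen2", "Gen"), ("gent", "Gen"), ("loc2", "Loc"), ("loct", "Loc"), ("nomn", "Nom"), ("voct", "Voc")]),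
   ("Degree", PySem.Dict.mk [("COMP", "Cmp"), ("Supr", "Sup")]),
   ("Gender", PySem.Dict.mk [("femn", "Fem"), ("masc", "Masc"), ("neut", "Neut")]),
   ("Mood", PySem.Dict.mk [("impr", "Imp"), ("indc", "Ind")]),
   ("NumForm", PySem.Dict.mk [("NUMB", "Digit")]),
   ("Number", PySem.Dict.mk [("plur", "Plur"), ("sing", "Sing")]),
   ("Person", PySem.Dict.mk [("1per", "1"), ("2per", "2"), ("3per", "3"), ("excl", "2"), ("incl", "1")]),
   ("Tense", PySem.Dict.mk [("futr", "Fut"), ("past", "Past"), ("pres", "Pres")]),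
   ("Variant", PySem.Dict.mk [("ADJS", "Brev"), ("PRTS", "Brev")]),
   ("VerbForm", PySem.Dict.mk [("GRND", "Conv"), ("INFN", "Inf"), ("PRTF", "Part"), ("PRTS", "Part"), ("VERB", "Fin")]),
   ("Voice", PySem.Dict.mk [("actv", "Act"), ("pssv", "Pass")]),
   ("_POS", PySem.Dict.mk [("ADJF", "ADJ"), ("ADJS", "ADJ"), ("ADVB", "ADV"), ("Apro", "DET"), ("COMP", "ADJ"), ("CONJ", "CCONJ"), ("GRND", "VERB"), ("INFN", "VERB"), ("INTJ", "INTJ"), ("NOUN", "NOUN"), ("NPRO", "PRON"), ("NUMR", "NUM"), ("NUMB", "NUM"), ("PNCT", "PUNCT"), ("PRCL", "PART"), ("PREP", "ADP"), ("PRTF", "VERB"), ("PRTS", "VERB"), ("VERB", "VERB")])]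

theorem ocSorted_eval :
    PySem.List.sorted ocGramMap.items (fun p => p.1.toList) false = ocSortedLit := by decide

-- the pairs A's inner scan collects for a gram, in scan (sorted-category) order
def ocColL : List (String × PySem.Dict String String) → String → List (String × String)
  | [], _ => []
  | cg :: L, g =>
    if cg.2.contains g then (cg.1, cg.2.getD g "") :: ocColL L g else ocColL L g

-- applying a collected pair list to (pos, morphology), as A's inner scan does
def ocApplyPairs (pairs : List (String × String)) (pos : String)
    (morphology : PySem.Dict String String) : String × PySem.Dict String String :=
  pairs.foldl (fun st cv => if cv.1 = "_POS" then (cv.2, st.2) else (st.1, st.2.insert cv.1 cv.2))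
    (pos, morphology)

-- A's inner fold = (did anything match, the application of the collected pairs)
theorem ocInner (g : String) (L : List (String × PySem.Dict String String)) :
    ∀ (b : Bool) (p : String) (m : PySem.Dict String String),
    L.foldl
      (fun acc cg =>
        if cg.2.contains g then
          (true,
           if cg.1 = "_POS" then cg.2.getD g "" else acc.2.1,
           if cg.1 = "_POS" then acc.2.2 else acc.2.2.insert cg.1 (cg.2.getD g ""))
        else acc)
      (b, p, m)
    = (b || !(ocColL L g).isEmpty, ocApplyPairs (ocColL L g) p m) := by
  induction L with
  | nil => intro b p m; simp [ocColL, ocApplyPairs]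
  | cons cg L ih =>
    intro b p m
    by_cases hc : cg.2.contains g
    · simp only [List.foldl_cons, ocColL, hc, if_true, ih]
      by_cases hp : cg.1 = "_POS" <;>
        simp [ocApplyPairs, hp]
    · simp only [List.foldl_cons, ocColL, hc, if_false, Bool.false_eq_true, ih]

theorem ocColL_ne_nil {L : List (String × PySem.Dict String String)} {g : String}
    (h : ocColL L g ≠ []) : ∃ cg ∈ L, cg.2.contains g = true := by
  induction L with
  | nil => simp [ocColL] at h
  | cons cg L ih =>
    by_cases hc : cg.2.contains g
    · exact ⟨cg, List.mem_cons_self, hc⟩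
    · simp only [ocColL, hc, if_false, Bool.false_eq_true] at h
      obtain ⟨cg', hm, hc'⟩ := ih h
      exact ⟨cg', List.mem_cons_of_mem _ hm, hc'⟩

-- all grams known to either of B's tables
def ocKeys : List String := ocPosLit.keys ++ ocMorphLit.keys

-- the pairs A collects for a gram, expressed by B's two tables ("_POS" sorts after every category name)
set_option maxRecDepth 100000 in
theorem ocColL_eq (g : String) :
    ocColL ocSortedLit g
      = ocMorphLit.getD g [] ++
        (match ocPosLit.get? g with | some v => [("_POS", v)] | none => []) := by
  by_cases h : g ∈ ocKeys
  · exact (by decide :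
      ∀ x ∈ ocKeys,
        ocColL ocSortedLit x
          = ocMorphLit.getD x [] ++
            (match ocPosLit.get? x with | some v => [("_POS", v)] | none => [])) g h
  · have hcol : ocColL ocSortedLit g = [] := by
      by_contra hne
      obtain ⟨cg, hm, hc⟩ := ocColL_ne_nil hne
      have hk : g ∈ cg.2.keys := (PySem.Dict.contains_iff_mem_keys _ _).mp hc
      exact h ((by decide :
        ∀ cg ∈ ocSortedLit, ∀ k ∈ cg.2.keys, k ∈ ocKeys) cg hm g hk)
    have hp : ocPosLit.get? g = none :=
      (PySem.Dict.get?_eq_none_iff_not_mem_keys _ _).mpr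
        (fun hm => h (List.mem_append.mpr (Or.inl hm)))
    have hm : ocMorphLit.get? g = none :=
      (PySem.Dict.get?_eq_none_iff_not_mem_keys _ _).mpr
        (fun hm => h (List.mem_append.mpr (Or.inr hm)))
    rw [hcol, hp, PySem.Dict.getD_eq_get?_getD, hm]
    rfl

-- the morphology pairs never carry the "_POS" marker
theorem ocMorph_noPos (g : String) : ∀ cv ∈ ocMorphLit.getD g [], cv.1 ≠ "_POS" := by
  by_cases h : g ∈ ocMorphLit.keys
  · exact (by decide : ∀ x ∈ ocMorphLit.keys, ∀ cv ∈ ocMorphLit.getD x [], cv.1 ≠ "_POS") g h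
  · rw [PySem.Dict.getD_eq_get?_getD, (PySem.Dict.get?_eq_none_iff_not_mem_keys _ _).mpr h]
    intro cv hcv
    simp at hcv

theorem ocApply_noPos (ps : List (String × String)) :
    ∀ (p : String) (m : PySem.Dict String String), (∀ cv ∈ ps, cv.1 ≠ "_POS") →
    ocApplyPairs ps p m = (p, ps.foldl (fun d cv => d.insert cv.1 cv.2) m) := by
  induction ps with
  | nil => intro p m _; rfl
  | cons cv ps ih =>
    intro p m h
    have hcv : cv.1 ≠ "_POS" := h cv List.mem_cons_self
    simp only [ocApplyPairs, List.foldl_cons, if_neg hcv]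
    exact ih p (m.insert cv.1 cv.2) (fun x hx => h x (List.mem_cons_of_mem _ hx))

-- A's per-gram work, characterised by B's two tables
theorem ocApply_split (g : String) (p : String) (m : PySem.Dict String String) :
    ocApplyPairs (ocColL ocSortedLit g) p m
      = ((ocPosLit.get? g).getD p,
         ((ocMorphLit.get? g).getD []).foldl (fun d cv => d.insert cv.1 cv.2) m) := by
  rw [ocColL_eq, ← PySem.Dict.getD_eq_get?_getD]
  unfold ocApplyPairs
  rw [List.foldl_append]
  have hm := ocApply_noPos (ocMorphLit.getD g []) p m (ocMorph_noPos g)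
  unfold ocApplyPairs at hm
  rw [hm]
  cases h : ocPosLit.get? g <;> simp [PySem.Dict.getD_eq_get?_getD, h]

-- whether A's inner scan found a match, by B's two tables
set_option maxRecDepth 100000 in
theorem ocEmpty_eq (g : String) :
    (ocColL ocSortedLit g).isEmpty = ((ocPosLit.get? g).isNone && (ocMorphLit.get? g).isNone) := by
  rw [ocColL_eq]
  cases hp : ocPosLit.get? g with
  | some v => simp
  | none =>
    simp only [List.append_nil, Option.isNone_none, Bool.true_and]
    by_cases h : g ∈ ocMorphLit.keys
    · exact (by decide :
        ∀ x ∈ ocMorphLit.keys,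
          (ocMorphLit.getD x []).isEmpty = (ocMorphLit.get? x).isNone) g h
    · rw [PySem.Dict.getD_eq_get?_getD, (PySem.Dict.get?_eq_none_iff_not_mem_keys _ _).mpr h]
      rfl

-- per-gram characterisation of A's loop body
theorem ocStepA_char (p : String) (m : PySem.Dict String String) (S : PySem.Set String)
    (g : String) :
    oc2udStep (p, m, S) g
      = ((ocPosLit.get? g).getD p,
         ((ocMorphLit.get? g).getD []).foldl (fun d cv => d.insert cv.1 cv.2) m,
         if (ocPosLit.get? g).isNone && (ocMorphLit.get? g).isNone then PySem.Set.add S g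
         else S) := by
  simp only [oc2udStep]
  rw [ocSorted_eval, ocInner g ocSortedLit false p m, ← ocEmpty_eq]
  cases hc : (ocColL ocSortedLit g).isEmpty <;> simp [ocApply_split]

-- the unmatched grams of a gram list
def ocU (grams : List String) : List String :=
  grams.filter (fun g => (ocPosLit.get? g).isNone && (ocMorphLit.get? g).isNone)

-- dropping a gram w is not equal to from a membership / existential over a cons
theorem ocMemCons {w g : String} {l : List String} (h : w ≠ g) : (w ∈ g :: l) ↔ w ∈ l :=
  List.mem_cons.trans (or_iff_right h)

theorem ocExCons {g : String} {l : List String}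
    (h : g ∉ (["Name", "Patr", "Surn", "Geox", "Orgn"] : List String)) :
    (∃ w ∈ (["Name", "Patr", "Surn", "Geox", "Orgn"] : List String), w ∈ g :: l)
      ↔ ∃ w ∈ (["Name", "Patr", "Surn", "Geox", "Orgn"] : List String), w ∈ l := by
  constructor
  · rintro ⟨w, hw, hm⟩
    rcases List.mem_cons.mp hm with rfl | hm'
    · exact absurd hw h
    · exact ⟨w, hw, hm'⟩
  · rintro ⟨w, hw, hm⟩
    exact ⟨w, hw, List.mem_cons_of_mem _ hm⟩

-- main loops: A and B agree on pos and morphology; A's unmatched set collects the new unmatched grams,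
-- B's three flags record precisely which kinds of special grams went unmatched
theorem ocMain (grams : List String) :
    ∀ (p : String) (m : PySem.Dict String String) (S : PySem.Set String)
      (hp ha hpl : Bool),
    grams.foldl oc2udStep (p, m, S)
      = ((grams.foldl oc2udAltStep (p, m, hp, ha, hpl)).1,
         (grams.foldl oc2udAltStep (p, m, hp, ha, hpl)).2.1,
         PySem.Set.update S (ocU grams)) ∧
    (grams.foldl oc2udAltStep (p, m, hp, ha, hpl)).2.2
      = (hp || decide (∃ w ∈ (["Name", "Patr", "Surn", "Geox", "Orgn"] : List String),
            w ∈ ocU grams),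
         ha || decide ("Auxt" ∈ ocU grams),
         hpl || decide ("Pltm" ∈ ocU grams)) := by
  induction grams with
  | nil =>
    intro p m S hp ha hpl
    simp [ocU, PySem.Set.update_nil]
  | cons g gs ih =>
    intro p m S hp ha hpl
    rw [List.foldl_cons, List.foldl_cons, ocStepA_char]
    rcases hc : ((ocPosLit.get? g).isNone && (ocMorphLit.get? g).isNone) with _ | _
    · -- matched gram: not added anywhere
      have hU : ocU (g :: gs) = ocU gs := by simp [ocU, hc]
      simp only [oc2udAltStep, ocPos_eval, ocMorph_eval, hc, if_false, hU, Bool.false_eq_true]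
      exact ih _ _ S hp ha hpl
    · -- unmatched gram
      have hU : ocU (g :: gs) = g :: ocU gs := by simp [ocU, hc]
      have hgd : (ocPosLit.get? g).getD p = p := by
        rcases Bool.and_eq_true .. |>.mp hc with ⟨h1, _⟩
        cases hpg : ocPosLit.get? g <;> simp_all
      have hmd : ((ocMorphLit.get? g).getD []).foldl (fun d cv => d.insert cv.1 cv.2) m = m := by
        rcases Bool.and_eq_true .. |>.mp hc with ⟨_, h2⟩
        cases hmg : ocMorphLit.get? g <;> simp_all
      simp only [oc2udAltStep, ocPos_eval, ocMorph_eval, hc, if_true, hU, PySem.Set.update_cons, hgd, hmd]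
      by_cases h1 : g ∈ (["Name", "Patr", "Surn", "Geox", "Orgn"] : List String)
      · rw [if_pos h1]
        obtain ⟨e1, e2⟩ := ih p m (PySem.Set.add S g) true ha hpl
        refine ⟨e1, ?_⟩
        rw [e2]
        have hga : ("Auxt" : String) ≠ g := by fin_cases h1 <;> decide
        have hgp : ("Pltm" : String) ≠ g := by fin_cases h1 <;> decide
        rw [show decide ("Auxt" ∈ g :: ocU gs) = decide ("Auxt" ∈ ocU gs) from
              decide_eq_decide.mpr (ocMemCons hga),
            show decide ("Pltm" ∈ g :: ocU gs) = decide ("Pltm" ∈ ocU gs) from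
              decide_eq_decide.mpr (ocMemCons hgp),
            decide_eq_true (show ∃ w ∈ (["Name", "Patr", "Surn", "Geox", "Orgn"] : List String),
              w ∈ g :: ocU gs from ⟨g, h1, List.mem_cons_self⟩)]
        simp
      · rw [if_neg h1]
        by_cases h2 : g = "Auxt"
        · rw [if_pos h2]
          obtain ⟨e1, e2⟩ := ih p m (PySem.Set.add S g) hp true hpl
          refine ⟨e1, ?_⟩
          rw [e2]
          subst h2
          rw [show decide (∃ w ∈ (["Name", "Patr", "Surn", "Geox", "Orgn"] : List String),
                w ∈ "Auxt" :: ocU gs)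
              = decide (∃ w ∈ (["Name", "Patr", "Surn", "Geox", "Orgn"] : List String),
                w ∈ ocU gs) from decide_eq_decide.mpr (ocExCons (by decide)),
              show decide ("Pltm" ∈ "Auxt" :: ocU gs) = decide ("Pltm" ∈ ocU gs) from
                decide_eq_decide.mpr (ocMemCons (by decide)),
              decide_eq_true (show "Auxt" ∈ "Auxt" :: ocU gs from List.mem_cons_self)]
          simp
        · rw [if_neg h2]
          by_cases h3 : g = "Pltm"
          · rw [if_pos h3]
            obtain ⟨e1, e2⟩ := ih p m (PySem.Set.add S g) hp ha true
            refine ⟨e1, ?_⟩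
            rw [e2]
            subst h3
            rw [show decide (∃ w ∈ (["Name", "Patr", "Surn", "Geox", "Orgn"] : List String),
                  w ∈ "Pltm" :: ocU gs)
                = decide (∃ w ∈ (["Name", "Patr", "Surn", "Geox", "Orgn"] : List String),
                  w ∈ ocU gs) from decide_eq_decide.mpr (ocExCons (by decide)),
                show decide ("Auxt" ∈ "Pltm" :: ocU gs) = decide ("Auxt" ∈ ocU gs) from
                  decide_eq_decide.mpr (ocMemCons (by decide)),
                decide_eq_true (show "Pltm" ∈ "Pltm" :: ocU gs from List.mem_cons_self)]
            simp
          · rw [if_neg h3]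
            obtain ⟨e1, e2⟩ := ih p m (PySem.Set.add S g) hp ha hpl
            refine ⟨e1, ?_⟩
            rw [e2]
            rw [show decide (∃ w ∈ (["Name", "Patr", "Surn", "Geox", "Orgn"] : List String),
                  w ∈ g :: ocU gs)
                = decide (∃ w ∈ (["Name", "Patr", "Surn", "Geox", "Orgn"] : List String),
                  w ∈ ocU gs) from decide_eq_decide.mpr (ocExCons h1),
                show decide ("Auxt" ∈ g :: ocU gs) = decide ("Auxt" ∈ ocU gs) from
                  decide_eq_decide.mpr (ocMemCons (fun he => h2 he.symm)),
                show decide ("Pltm" ∈ g :: ocU gs) = decide ("Pltm" ∈ ocU gs) from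
                  decide_eq_decide.mpr (ocMemCons (fun he => h3 he.symm))]

-- at most one of the two pos-overriding kinds of special grams is present
def ocCond (u : List String) : Prop :=
  ¬ ("Auxt" ∈ u ∧ ∃ g ∈ (["Name", "Patr", "Surn", "Geox", "Orgn"] : List String), g ∈ u)

theorem ocCond_tail {g : String} {gs : List String} (h : ocCond (g :: gs)) : ocCond gs := by
  unfold ocCond at *
  intro ⟨ha, w, hw, hm⟩
  exact h ⟨List.mem_cons_of_mem _ ha, w, hw, List.mem_cons_of_mem _ hm⟩

-- closed form of A's pop loop under ocCond: it only reads which special grams are PRESENT,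
-- so it is invariant under deduplication and reordering of u
theorem ocPop_closed : ∀ (u : List String), ocCond u →
    ∀ (p : String) (m : PySem.Dict String String),
    ocPopLoopA u p m
      = ((if ∃ g ∈ (["Name", "Patr", "Surn", "Geox", "Orgn"] : List String), g ∈ u then "PROPN"
          else if "Auxt" ∈ u then "AUX" else p),
         (if "Pltm" ∈ u then m.insert "Number" "Ptan" else m)) := by
  intro u
  induction u with
  | nil => intro _ p m; simp [ocPopLoopA]
  | cons g gs ih =>
    intro hc p m
    have hgs := ocCond_tail hc
    by_cases h1 : g ∈ (["Name", "Patr", "Surn", "Geox", "Orgn"] : List String)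
    · have hna : "Auxt" ∉ g :: gs := fun ha => hc ⟨ha, g, h1, List.mem_cons_self⟩
      have hax : "Auxt" ∉ gs := fun ha => hna (List.mem_cons_of_mem _ ha)
      have hgp : g ≠ "Pltm" := by fin_cases h1 <;> decide
      rw [show ocPopLoopA (g :: gs) p m = ocPopLoopA gs "PROPN" m from by
          simp [ocPopLoopA, h1], ih hgs]
      simp only [Prod.mk.injEq]
      refine ⟨?_, ?_⟩
      · rw [if_pos (show ∃ w ∈ (["Name", "Patr", "Surn", "Geox", "Orgn"] : List String),
            w ∈ (g :: gs : List String) from ⟨g, h1, List.mem_cons_self⟩), if_neg hax]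
        split_ifs <;> rfl
      · rw [if_congr (List.mem_cons.trans (or_iff_right (fun he => hgp he.symm))) rfl rfl]
    · by_cases h2 : g = "Auxt"
      · subst h2
        have hnpc : ¬ ∃ w ∈ (["Name", "Patr", "Surn", "Geox", "Orgn"] : List String),
            w ∈ ("Auxt" :: gs : List String) := by
          rintro ⟨w, hw, hm⟩
          rcases List.mem_cons.mp hm with rfl | hm'
          · exact h1 hw
          · exact hc ⟨List.mem_cons_self, w, hw, List.mem_cons_of_mem _ hm'⟩
        have hnp' : ¬ ∃ w ∈ (["Name", "Patr", "Surn", "Geox", "Orgn"] : List String),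
            w ∈ gs := fun ⟨w, hw, hm⟩ => hnpc ⟨w, hw, List.mem_cons_of_mem _ hm⟩
        rw [show ocPopLoopA ("Auxt" :: gs) p m = ocPopLoopA gs "AUX" m from by
            simp [ocPopLoopA, h1], ih hgs]
        simp only [Prod.mk.injEq]
        refine ⟨?_, ?_⟩
        · rw [if_neg hnp', if_neg hnpc, if_pos (List.mem_cons_self)]
          split_ifs <;> rfl
        · rw [if_congr (List.mem_cons.trans (or_iff_right (by decide))) rfl rfl]
      · by_cases h3 : g = "Pltm"
        · subst h3
          have e1 : (∃ w ∈ (["Name", "Patr", "Surn", "Geox", "Orgn"] : List String),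
              w ∈ ("Pltm" :: gs : List String)) ↔
              ∃ w ∈ (["Name", "Patr", "Surn", "Geox", "Orgn"] : List String), w ∈ gs := by
            constructor
            · rintro ⟨w, hw, hm⟩
              rcases List.mem_cons.mp hm with rfl | hm'
              · exact absurd hw (by decide)
              · exact ⟨w, hw, hm'⟩
            · rintro ⟨w, hw, hm⟩
              exact ⟨w, hw, List.mem_cons_of_mem _ hm⟩
          rw [show ocPopLoopA ("Pltm" :: gs) p m
              = ocPopLoopA gs p (m.insert "Number" "Ptan") from by
              simp [ocPopLoopA, h1, h2], ih hgs]
          simp only [Prod.mk.injEq]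
          refine ⟨?_, ?_⟩
          · rw [if_congr e1 rfl rfl,
              if_congr (List.mem_cons.trans (or_iff_right (by decide))) rfl rfl]
          · rw [if_pos (List.mem_cons_self)]
            split_ifs with hm1
            · rw [PySem.Dict.insert_insert_self]
            · rfl
        · have e1 : (∃ w ∈ (["Name", "Patr", "Surn", "Geox", "Orgn"] : List String),
              w ∈ (g :: gs : List String)) ↔
              ∃ w ∈ (["Name", "Patr", "Surn", "Geox", "Orgn"] : List String), w ∈ gs := by
            constructor
            · rintro ⟨w, hw, hm⟩
              rcases List.mem_cons.mp hm with rfl | hm'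
              · exact absurd hw h1
              · exact ⟨w, hw, hm'⟩
            · rintro ⟨w, hw, hm⟩
              exact ⟨w, hw, List.mem_cons_of_mem _ hm⟩
          rw [show ocPopLoopA (g :: gs) p m = ocPopLoopA gs p m from by
              simp [ocPopLoopA, h1, h2, h3], ih hgs]
          simp only [Prod.mk.injEq]
          refine ⟨?_, ?_⟩
          · rw [if_congr e1 rfl rfl,
              if_congr (List.mem_cons.trans (or_iff_right (fun he => h2 he.symm))) rfl rfl]
          · rw [if_congr (List.mem_cons.trans (or_iff_right (fun he => h3 he.symm))) rfl rfl]

-- ===== VERDICT (by name: the statement is the Claim_ definition above) =====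
theorem oc2ud_spec : Claim_equal_oc2ud := by
  intro oc_tag _ hpre
  unfold Spec_oc2ud oc2ud oc2ud_alt
  set grams := (PySem.Str.split? (PySem.Str.replace oc_tag " " ",") ",").getD [] with hgrams
  obtain ⟨hA, hB⟩ := ocMain grams "X" PySem.Dict.empty PySem.Set.empty false false false
  simp only [hA, hB, Bool.false_or]
  rw [show PySem.Set.update PySem.Set.empty (ocU grams) = PySem.Set.ofList (ocU grams)
    from PySem.Set.update_nil_left _]
  have hsub : ∀ x, x ∈ ocU grams → x ∈ grams := fun x hx => List.mem_of_mem_filter hx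
  have hcond : ocCond (ocU grams) :=
    fun ⟨ha, w, hw, hm⟩ => hpre ⟨hsub _ ha, w, hw, hsub _ hm⟩
  have hcond' : ocCond (PySem.Set.ofList (ocU grams)) :=
    fun ⟨ha, w, hw, hm⟩ => hcond ⟨(PySem.Set.mem_ofList _ _).mp ha, w, hw,
      (PySem.Set.mem_ofList _ _).mp hm⟩
  rw [ocPop_closed _ hcond']
  have em : ∀ x, x ∈ PySem.Set.ofList (ocU grams) ↔ x ∈ ocU grams :=
    fun x => PySem.Set.mem_ofList _ _
  have eP : (∃ w ∈ (["Name", "Patr", "Surn", "Geox", "Orgn"] : List String),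
      w ∈ PySem.Set.ofList (ocU grams))
      ↔ ∃ w ∈ (["Name", "Patr", "Surn", "Geox", "Orgn"] : List String), w ∈ ocU grams := by
    constructor
    · rintro ⟨w, hw, hm⟩; exact ⟨w, hw, (em w).mp hm⟩
    · rintro ⟨w, hw, hm⟩; exact ⟨w, hw, (em w).mpr hm⟩
  rw [if_congr eP rfl rfl, if_congr (em "Auxt") rfl rfl, if_congr (em "Pltm") rfl rfl]
  refine Prod.ext ?_ ?_
  · simp only []
    split_ifs <;> simp_all
  · simp only []
    split_ifs <;> simp_all
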